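-- pv_equiv track=rewrite | github.com/sean-lai-sh/dsa | Homework4/ssl9626_hw4_q5.py | count_lowercase
-- ===== SOURCE A (Python) =====
-- def count_lowercase(s, low, high):
--     if low < 0 or high > len(s):
--         raise IndexError("Invalid Range!!!!")
--     if low <= high:
--         if s[low].islower():
--             return 1 + count_lowercase(s, low + 1, high)
--         else:
--             return 0 + count_lowercase(s, low + 1, high)
--     return 0
-- ===== SOURCE B (Python) =====
-- def count_lowercase(s, low, high):
--     if low < 0 or high > len(s):
--         raise IndexError("Invalid Range!!!!")
--     total = 0
--     for i in range(low, high + 1):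
--         if s[i].islower():
--             total += 1
--     return total
-- ===== Notes on version B (the rewrite author's own statement) =====
-- stated objective: idiomatic
-- what changed: Replaces the linear recursion (one Python stack frame per character) with a single iterative loop over the inclusive index range accumulating a counter.
import Mathlib
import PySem

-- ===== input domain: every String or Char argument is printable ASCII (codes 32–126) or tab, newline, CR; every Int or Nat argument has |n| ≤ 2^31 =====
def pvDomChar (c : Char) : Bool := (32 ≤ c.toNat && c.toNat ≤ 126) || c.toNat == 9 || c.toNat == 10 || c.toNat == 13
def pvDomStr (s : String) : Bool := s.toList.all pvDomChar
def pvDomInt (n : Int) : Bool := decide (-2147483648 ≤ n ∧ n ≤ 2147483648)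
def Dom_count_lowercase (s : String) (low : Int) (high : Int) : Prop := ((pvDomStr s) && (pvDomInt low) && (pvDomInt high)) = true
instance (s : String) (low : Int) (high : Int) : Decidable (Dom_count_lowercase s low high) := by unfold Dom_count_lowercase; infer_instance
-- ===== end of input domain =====

-- B replaces A's linear recursion with an iterative loop over the inclusive index
-- range accumulating a counter (same cost, no recursion depth).

-- ===== PORT A =====
-- literal transliteration of A's recursion; the `0` results on the guard / none
-- branches stand for Python's IndexError and are excluded by Pre_count_lowercase
def count_lowercase (s : String) (low : Int) (high : Int) : Int :=
  if low < 0 ∨ high > PySem.Str.len s then 0   -- raise IndexError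
  else if low ≤ high then
    match PySem.Str.pyGet? s low with
    | none => 0                                 -- s[low] raises IndexError
    | some c =>
      if PySem.Chars.islower c then 1 + count_lowercase s (low + 1) high
      else 0 + count_lowercase s (low + 1) high
  else 0
termination_by (high + 1 - low).toNat
decreasing_by all_goals omega

-- ===== PORT B =====
def count_lowercase_alt (s : String) (low : Int) (high : Int) : Int :=
  if low < 0 ∨ high > PySem.Str.len s then 0   -- raise IndexError
  else
    (PySem.List.pyRange low (high + 1) 1).foldl
      (fun total i =>
        match PySem.Str.pyGet? s i with
        | none => total                         -- s[i] raises IndexError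
        | some c => if PySem.Chars.islower c then total + 1 else total) 0

-- ===== PRECONDITION & SPEC =====
-- Pre_ excludes exactly the inputs where the Python A raises IndexError:
-- low < 0, high > len(s), or (low ≤ high with high = len(s), where the
-- recursion eventually dereferences s[len(s)]).
def Pre_count_lowercase (s : String) (low : Int) (high : Int) : Prop :=
  0 ≤ low ∧ high ≤ PySem.Str.len s ∧ (low ≤ high → high < PySem.Str.len s)
instance (s : String) (low : Int) (high : Int) : Decidable (Pre_count_lowercase s low high) := by unfold Pre_count_lowercase; infer_instance

def pvWitness_count_lowercase : String × Int × Int := ("aBc d", 1, 4)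

def Spec_count_lowercase (s : String) (low : Int) (high : Int) (out : Int) : Prop := out = count_lowercase_alt s low high
instance (s : String) (low : Int) (high : Int) (out : Int) : Decidable (Spec_count_lowercase s low high out) := by unfold Spec_count_lowercase; infer_instance

-- ===== CLAIM (what is proved, stated in full; the proofs are below) =====
def Claim_equal_count_lowercase : Prop := ∀ (s : String) (low : Int) (high : Int), Dom_count_lowercase s low high → Pre_count_lowercase s low high → Spec_count_lowercase s low high (count_lowercase s low high)

-- ===== LEMMAS AND PROOFS =====

-- the common step function of B's fold
def pvStep (s : String) : Int → Int → Int := fun total i =>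
  match PySem.Str.pyGet? s i with
  | none => total
  | some c => if PySem.Chars.islower c then total + 1 else total

-- B's fold from any accumulator equals the accumulator plus A's recursion,
-- whenever the whole range is in bounds.
lemma count_unfold (s : String) (low high : Int) (c : Char) (h0 : 0 ≤ low)
    (hh : high < PySem.Str.len s) (hle : low ≤ high)
    (hc : s.toList[low.toNat]? = some c) :
    count_lowercase s low high
      = (if PySem.Chars.islower c then 1 else 0) + count_lowercase s (low + 1) high := by
  rw [count_lowercase]
  have hguard : ¬ (low < 0 ∨ high > PySem.Str.len s) := by omega
  have hget : PySem.Str.pyGet? s low = some c := by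
    rw [show low = ((low.toNat : Nat) : Int) by omega, PySem.Str.pyGet?_natCast, hc]
  rw [if_neg hguard, if_pos hle, hget]
  by_cases hl : PySem.Chars.islower c <;> simp [hl]

-- B's fold from any accumulator equals the accumulator plus A's recursion,
-- whenever the whole range is in bounds.
lemma fold_eq_count (s : String) (low high : Int) (h0 : 0 ≤ low)
    (hh : high < PySem.Str.len s) (acc : Int) :
    (PySem.List.pyRange low (high + 1) 1).foldl (pvStep s) acc
      = acc + count_lowercase s low high := by
  by_cases hle : low ≤ high
  · have hlen : PySem.Str.len s = (s.toList.length : Int) := by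
      simp [PySem.Str.len]
    have hlt : low.toNat < s.toList.length := by omega
    obtain ⟨c, hc⟩ : ∃ c, s.toList[low.toNat]? = some c :=
      ⟨_, List.getElem?_eq_getElem hlt⟩
    rw [PySem.List.pyRange_one_cons (by omega)]
    simp only [List.foldl_cons]
    rw [fold_eq_count s (low + 1) high (by omega) hh,
      count_unfold s low high _ h0 hh hle hc]
    have hget : PySem.Str.pyGet? s low = some c := by
      rw [show low = ((low.toNat : Nat) : Int) by omega, PySem.Str.pyGet?_natCast, hc]
    simp only [pvStep, hget]
    split <;> ring
  · rw [PySem.List.pyRange_one_eq_nil (by omega)]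
    rw [count_lowercase]
    have hguard : ¬ (low < 0 ∨ high > PySem.Str.len s) := by omega
    rw [if_neg hguard, if_neg hle]
    simp
termination_by (high + 1 - low).toNat
decreasing_by omega

-- ===== VERDICT (by name: the statement is the Claim_ definition above) =====
theorem count_lowercase_spec : Claim_equal_count_lowercase := by
  intro s low high _ hpre
  obtain ⟨h0, hle, himp⟩ := hpre
  unfold Spec_count_lowercase count_lowercase_alt
  have hguard : ¬ (low < 0 ∨ high > PySem.Str.len s) := by omega
  rw [if_neg hguard]
  by_cases hlh : low ≤ high
  · rw [show (fun total i =>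
        match PySem.Str.pyGet? s i with
        | none => total
        | some c => if PySem.Chars.islower c then total + 1 else total) = pvStep s from rfl,
      fold_eq_count s low high h0 (himp hlh) 0]
    ring
  · rw [PySem.List.pyRange_one_eq_nil (by omega)]
    rw [count_lowercase]
    rw [if_neg hguard, if_neg hlh]
    simp
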